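-- pv_equiv track=rewrite | github.com/ctc316/algorithm-python | Lintcode/Ladder_all_G_OA/1541. Put Box.py | putBox
-- ===== SOURCE A (Python) =====
-- def putBox(box, position):
--     '''
--         0  1 2 3 4
--      0  0  0 0 0 0
--      4  0  0 0 0 1
--      2  0  0 1 1 1
--      3  0  0 1 2 2
--      1  0  1 1 2 3
--     '''
--
--     n_box = len(box)
--     n_pos = len(position)
--     dp = [[0 for _ in range(n_pos + 1)] for __ in range(n_box + 1)]
--     for i in range(n_box):
--         for j in range(n_pos):
--             if box[i] <= position[j]:
--                 dp[i + 1][j + 1] = dp[i][j] + 1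
--             else:
--                 dp[i + 1][j + 1] = max(dp[i][j + 1], dp[i + 1][j])
--
--     return dp[n_box][n_pos]
-- ===== SOURCE B (Python) =====
-- def putBox(box, position):
--     # Top-down demand-driven DP: first mark, diagonal by diagonal (a cell (i, j) with
--     # i + j = s is recorded by its row index i), only the cells actually reachable from
--     # (n, m) under the recurrence; then evaluate just those cells in increasing-diagonal
--     # order, keeping only the value dicts of the last two diagonals.
--     n, m = len(box), len(position)
--     diag = [set() for _ in range(n + m + 1)]
--     diag[n + m].add(n)
--     for s in range(n + m, 1, -1):
--         add1 = diag[s - 1].add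
--         add2 = diag[s - 2].add
--         for i in diag[s]:
--             j = s - i
--             if i == 0 or j == 0:
--                 continue
--             if box[i - 1] <= position[j - 1]:
--                 add2(i - 1)
--             else:
--                 add1(i - 1)
--                 add1(i)
--     prev1, prev2 = {}, {}
--     for s in range(n + m + 1):
--         cur = {}
--         for i in diag[s]:
--             j = s - i
--             if i == 0 or j == 0:
--                 cur[i] = 0
--             elif box[i - 1] <= position[j - 1]:
--                 cur[i] = prev2[i - 1] + 1
--             else:
--                 p = prev1[i - 1]
--                 q = prev1[i]
--                 cur[i] = p if p >= q else q
--         prev1, prev2 = cur, prev1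
--     return prev1[n]
-- ===== Notes on version B (the rewrite author's own statement) =====
-- stated objective: alternative
-- what changed: Replaces A's full (n+1)x(m+1) bottom-up table with a top-down demand-driven evaluation: a first pass marks, diagonal by diagonal, only the cells actually reachable from (n, m) under the recurrence, and a second pass evaluates just those cells in increasing-diagonal order keeping only the value dicts of the last two diagonals.
import Mathlib
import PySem

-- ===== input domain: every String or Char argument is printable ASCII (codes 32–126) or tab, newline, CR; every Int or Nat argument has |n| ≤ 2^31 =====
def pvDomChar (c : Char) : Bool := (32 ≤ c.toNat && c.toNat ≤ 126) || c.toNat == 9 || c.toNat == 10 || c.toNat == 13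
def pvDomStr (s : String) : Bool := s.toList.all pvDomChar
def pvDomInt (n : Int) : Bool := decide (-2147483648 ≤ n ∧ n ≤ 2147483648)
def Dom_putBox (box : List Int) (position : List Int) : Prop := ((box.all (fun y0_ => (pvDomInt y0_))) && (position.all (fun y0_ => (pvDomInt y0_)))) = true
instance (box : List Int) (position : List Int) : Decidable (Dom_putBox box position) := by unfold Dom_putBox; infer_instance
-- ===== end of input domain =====

-- B replaces A's full 2D table with a demand-driven top-down evaluation: it first marks,
-- diagonal by diagonal, only the cells actually reachable from (n, m) under the recurrence,
-- then evaluates just those cells into a dict (objective: alternative decomposition).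

-- ===== PORT A =====
def pvGetD2 (dp : List (List Int)) (i j : Nat) : Int := (dp.getD i []).getD j 0

def pvSet2 (dp : List (List Int)) (i j : Nat) (v : Int) : List (List Int) :=
  dp.set i ((dp.getD i []).set j v)

-- inner 'for j in range(n_pos)' loop of A
def pvInnerA (box position : List Int) (i : Nat) (dp : List (List Int)) : List (List Int) :=
  (List.range position.length).foldl (fun dp j =>
    if box.getD i 0 ≤ position.getD j 0 then
      pvSet2 dp (i+1) (j+1) (pvGetD2 dp i j + 1)
    else
      pvSet2 dp (i+1) (j+1) (max (pvGetD2 dp i (j+1)) (pvGetD2 dp (i+1) j))) dp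

def putBox (box : List Int) (position : List Int) : Int :=
  let n_box := box.length
  let n_pos := position.length
  let dp0 := (List.range (n_box+1)).map (fun _ => (List.range (n_pos+1)).map (fun _ => (0 : Int)))
  let dp := (List.range n_box).foldl (fun dp i => pvInnerA box position i dp) dp0
  pvGetD2 dp n_box n_pos

-- ===== PORT B =====
-- body of 'for i in diag[s]' in B's first (marking) loop; a cell (i, j) with i + j = s
-- is recorded in diag[s] by its row index i (j = s - i)
def pvChildB (box position : List Int) (s : Nat) (d : List (PySem.Set Nat)) (i : Nat) :
    List (PySem.Set Nat) :=
  if i = 0 ∨ s - i = 0 then d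
  else if box.getD (i - 1) 0 ≤ position.getD (s - i - 1) 0 then
    d.set (s-2) (PySem.Set.add (d.getD (s-2) []) (i - 1))
  else
    let d1 := d.set (s-1) (PySem.Set.add (d.getD (s-1) []) (i - 1))
    d1.set (s-1) (PySem.Set.add (d1.getD (s-1) []) i)

def pvStep1 (box position : List Int) (s : Nat) (d : List (PySem.Set Nat)) :
    List (PySem.Set Nat) :=
  (d.getD s []).foldl (fun d i => pvChildB box position s d i) d

-- 'for s in range(n+m, 1, -1)' as recursion on the descending counter s
def pvPhase1 (box position : List Int) : Nat → List (PySem.Set Nat) → List (PySem.Set Nat)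
  | 0, d => d
  | 1, d => d
  | (s+2), d => pvPhase1 box position (s+1) (pvStep1 box position (s+2) d)

-- body of 'for i in diag[s]' in B's second (evaluation) loop; p1/p2 are the value dicts
-- of diagonals s-1 and s-2.  The prev2[i-1]/prev1[..] lookups are ported as
-- (get? _).getD 0: the proofs show the key is always present there, exactly where
-- Python's dict lookup would not raise.
def pvCellB (box position : List Int) (s : Nat) (p1 p2 : PySem.Dict Nat Int)
    (cur : PySem.Dict Nat Int) (i : Nat) : PySem.Dict Nat Int :=
  if i = 0 ∨ s - i = 0 then cur.insert i 0
  else if box.getD (i - 1) 0 ≤ position.getD (s - i - 1) 0 then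
    cur.insert i ((p2.get? (i - 1)).getD 0 + 1)
  else
    let p := (p1.get? (i - 1)).getD 0
    let q := (p1.get? i).getD 0
    cur.insert i (if q ≤ p then p else q)

def pvStep2 (box position : List Int) (d : List (PySem.Set Nat)) (s : Nat)
    (p1 p2 : PySem.Dict Nat Int) : PySem.Dict Nat Int :=
  (d.getD s []).foldl (pvCellB box position s p1 p2) PySem.Dict.empty

-- 'for s in range(n+m+1)' as recursion on the ascending bound; returns (prev1, prev2)
def pvPhase2 (box position : List Int) (d : List (PySem.Set Nat)) :
    Nat → PySem.Dict Nat Int × PySem.Dict Nat Int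
  | 0 => (pvStep2 box position d 0 PySem.Dict.empty PySem.Dict.empty, PySem.Dict.empty)
  | (s+1) =>
    let p := pvPhase2 box position d s
    (pvStep2 box position d (s+1) p.1 p.2, p.1)

def putBox_alt (box : List Int) (position : List Int) : Int :=
  let n := box.length
  let m := position.length
  let d0 := (((List.range (n+m+1)).map (fun _ => ([] : PySem.Set Nat))).set (n+m)
              (PySem.Set.add [] n))
  let d := pvPhase1 box position (n+m) d0
  (((pvPhase2 box position d (n+m)).1).get? n).getD 0

-- ===== PRECONDITION & SPEC =====
def Spec_putBox (box : List Int) (position : List Int) (out : Int) : Prop := out = putBox_alt box position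
instance (box : List Int) (position : List Int) (out : Int) : Decidable (Spec_putBox box position out) := by unfold Spec_putBox; infer_instance

-- ===== CLAIM (what is proved, stated in full; the proofs are below) =====
def Claim_equal_putBox : Prop := ∀ (box : List Int) (position : List Int), Dom_putBox box position → Spec_putBox box position (putBox box position)

-- ===== LEMMAS AND PROOFS =====

-- the common recurrence value of cell (i, j)
def gVal (box position : List Int) : Nat → Nat → Int
  | 0, _ => 0
  | _+1, 0 => 0
  | (i+1), (j+1) =>
    if box.getD i 0 ≤ position.getD j 0 then gVal box position i j + 1
    else max (gVal box position i (j+1)) (gVal box position (i+1) j)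

-- generic getD/set helper
theorem pvGetD_set {α : Type} (l : List α) (a i : Nat) (v d : α) (ha : a < l.length) :
    (l.set a v).getD i d = if i = a then v else l.getD i d := by
  by_cases h : i = a
  · subst h; simp [List.getD_eq_getElem?_getD, ha]
  · simp [List.getD_eq_getElem?_getD, h, Ne.symm h]

-- shape of A's table
def ShapeA (box position : List Int) (dp : List (List Int)) : Prop :=
  dp.length = box.length + 1 ∧ ∀ i, i ≤ box.length → (dp.getD i []).length = position.length + 1

theorem shapeA_set2 (box position : List Int) (dp : List (List Int)) (a b : Nat) (v : Int)
    (h : ShapeA box position dp) (ha : a ≤ box.length) :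
    ShapeA box position (pvSet2 dp a b v) := by
  obtain ⟨h1, h2⟩ := h
  refine ⟨by simp [pvSet2, h1], ?_⟩
  intro i hi
  rw [pvSet2, pvGetD_set _ _ _ _ _ (by omega)]
  split
  · next heq =>
    subst heq
    rw [List.length_set]
    exact h2 i hi
  · exact h2 i hi

theorem pvGetD2_set2 (box position : List Int) (dp : List (List Int)) (a b i j : Nat) (v : Int)
    (h : ShapeA box position dp) (ha : a ≤ box.length) (hb : b ≤ position.length) :
    pvGetD2 (pvSet2 dp a b v) i j = if i = a ∧ j = b then v else pvGetD2 dp i j := by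
  obtain ⟨h1, h2⟩ := h
  rw [pvGetD2, pvSet2, pvGetD_set _ _ _ _ _ (by omega)]
  by_cases hia : i = a
  · subst hia
    rw [if_pos rfl, pvGetD_set _ _ _ _ _ (by rw [h2 i ha]; omega)]
    by_cases hjb : j = b
    · subst hjb
      rw [if_pos rfl, if_pos ⟨rfl, rfl⟩]
    · rw [if_neg hjb, if_neg (by tauto)]
      rfl
  · rw [if_neg hia, if_neg (by tauto)]
    rfl

-- the invariant after the inner loop has processed columns 0..J-1 of row I
def CellInvA (box position : List Int) (dp : List (List Int)) (I J : Nat) : Prop :=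
  ShapeA box position dp ∧ ∀ i j, i ≤ box.length → j ≤ position.length →
    pvGetD2 dp i j = if i ≤ I ∨ (i = I + 1 ∧ j ≤ J) then gVal box position i j else 0

theorem gVal_zero_left (box position : List Int) (j : Nat) : gVal box position 0 j = 0 := by
  cases j <;> simp [gVal]

theorem gVal_zero_right (box position : List Int) (i : Nat) : gVal box position i 0 = 0 := by
  cases i <;> simp [gVal]

theorem gVal_succ (box position : List Int) (i j : Nat) :
    gVal box position (i+1) (j+1) =
      if box.getD i 0 ≤ position.getD j 0 then gVal box position i j + 1
      else max (gVal box position i (j+1)) (gVal box position (i+1) j) := by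
  simp [gVal]

-- one iteration of the inner loop
theorem cellInvA_step (box position : List Int) (dp : List (List Int)) (I J : Nat)
    (hI : I < box.length) (hJ : J < position.length)
    (h : CellInvA box position dp I J) :
    CellInvA box position
      (if box.getD I 0 ≤ position.getD J 0 then
        pvSet2 dp (I+1) (J+1) (pvGetD2 dp I J + 1)
      else
        pvSet2 dp (I+1) (J+1) (max (pvGetD2 dp I (J+1)) (pvGetD2 dp (I+1) J))) I (J+1) := by
  obtain ⟨hs, hv⟩ := h
  have e1 : pvGetD2 dp I J = gVal box position I J := by
    rw [hv I J (by omega) (by omega)]; exact if_pos (by omega)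
  have e2 : pvGetD2 dp I (J+1) = gVal box position I (J+1) := by
    rw [hv I (J+1) (by omega) (by omega)]; exact if_pos (by omega)
  have e3 : pvGetD2 dp (I+1) J = gVal box position (I+1) J := by
    rw [hv (I+1) J (by omega) (by omega)]; exact if_pos (by omega)
  have hrw : (if box.getD I 0 ≤ position.getD J 0 then
        pvSet2 dp (I+1) (J+1) (pvGetD2 dp I J + 1)
      else
        pvSet2 dp (I+1) (J+1) (max (pvGetD2 dp I (J+1)) (pvGetD2 dp (I+1) J))) =
      pvSet2 dp (I+1) (J+1) (gVal box position (I+1) (J+1)) := by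
    rw [← apply_ite (pvSet2 dp (I+1) (J+1)), e1, e2, e3, gVal_succ]
  rw [hrw]
  refine ⟨shapeA_set2 box position dp (I+1) (J+1) _ hs (by omega), fun i j hi hj => ?_⟩
  rw [pvGetD2_set2 box position dp (I+1) (J+1) i j _ hs (by omega) (by omega), hv i j hi hj]
  by_cases hc : i = I+1 ∧ j = J+1
  · obtain ⟨hc1, hc2⟩ := hc
    subst hc1; subst hc2
    rw [if_pos ⟨rfl, rfl⟩, if_pos (by omega)]
  · rw [if_neg hc]
    by_cases h1 : i ≤ I ∨ (i = I + 1 ∧ j ≤ J)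
    · rw [if_pos h1, if_pos (by omega)]
    · rw [if_neg h1, if_neg (by omega)]

-- the whole inner loop
theorem innerA_inv (box position : List Int) (dp : List (List Int)) (I : Nat)
    (hI : I < box.length) (h : CellInvA box position dp I 0) :
    CellInvA box position (pvInnerA box position I dp) I position.length := by
  rw [pvInnerA]
  suffices H : ∀ J, J ≤ position.length →
      CellInvA box position ((List.range J).foldl (fun dp j =>
        if box.getD I 0 ≤ position.getD j 0 then
          pvSet2 dp (I+1) (j+1) (pvGetD2 dp I j + 1)
        else
          pvSet2 dp (I+1) (j+1) (max (pvGetD2 dp I (j+1)) (pvGetD2 dp (I+1) j))) dp) I J by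
    exact H position.length le_rfl
  intro J
  induction J with
  | zero => intro _; simpa using h
  | succ J ih =>
    intro hJ
    have hr : List.range (J+1) = List.range J ++ [J] := List.range_succ
    rw [hr, List.foldl_append]
    simp only [List.foldl_cons, List.foldl_nil]
    exact cellInvA_step box position _ I J hI (by omega) (ih (by omega))

-- row invariant = cell invariant at the row boundaries
def RowInvA (box position : List Int) (dp : List (List Int)) (I : Nat) : Prop :=
  ShapeA box position dp ∧ ∀ i j, i ≤ box.length → j ≤ position.length →
    pvGetD2 dp i j = if i ≤ I then gVal box position i j else 0

theorem rowInvA_to_cell (box position : List Int) (dp : List (List Int)) (I : Nat)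
    (h : RowInvA box position dp I) : CellInvA box position dp I 0 := by
  obtain ⟨hs, hv⟩ := h
  refine ⟨hs, fun i j hi hj => ?_⟩
  rw [hv i j hi hj]
  by_cases h1 : i ≤ I
  · rw [if_pos h1, if_pos (Or.inl h1)]
  · by_cases h2 : i = I + 1 ∧ j ≤ 0
    · rw [if_neg h1, if_pos (Or.inr h2)]
      have : j = 0 := by omega
      subst this
      rw [gVal_zero_right]
    · rw [if_neg h1, if_neg (by tauto)]

theorem cellA_to_rowInv (box position : List Int) (dp : List (List Int)) (I : Nat)
    (h : CellInvA box position dp I position.length) : RowInvA box position dp (I+1) := by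
  obtain ⟨hs, hv⟩ := h
  refine ⟨hs, fun i j hi hj => ?_⟩
  rw [hv i j hi hj]
  by_cases h1 : i ≤ I ∨ (i = I + 1 ∧ j ≤ position.length)
  · rw [if_pos h1, if_pos (by omega)]
  · rw [if_neg h1, if_neg (by omega)]

theorem getD_map_const_range {α : Type} (k i : Nat) (x : α) (d : α) (hi : i < k) :
    (((List.range k).map (fun _ => x)).getD i d) = x := by
  rw [List.getD_eq_getElem?_getD, List.getElem?_map, List.getElem?_range hi]
  rfl

theorem outerA_inv (box position : List Int) :
    RowInvA box position ((List.range box.length).foldl (fun dp i => pvInnerA box position i dp)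
      ((List.range (box.length+1)).map (fun _ => (List.range (position.length+1)).map (fun _ => (0 : Int)))))
      box.length := by
  suffices H : ∀ I, I ≤ box.length →
      RowInvA box position ((List.range I).foldl (fun dp i => pvInnerA box position i dp)
        ((List.range (box.length+1)).map (fun _ => (List.range (position.length+1)).map (fun _ => (0 : Int))))) I by
    exact H box.length le_rfl
  intro I
  induction I with
  | zero =>
    intro _
    simp only [List.range_zero, List.foldl_nil]
    refine ⟨⟨by simp, fun i hi => ?_⟩, fun i j hi hj => ?_⟩
    · rw [getD_map_const_range _ _ _ _ (by omega)]
      simp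
    · rw [pvGetD2, getD_map_const_range _ _ _ _ (by omega),
        getD_map_const_range _ _ _ _ (by omega)]
      have hi0 : ¬ (i ≤ 0) ∨ i = 0 := by omega
      by_cases hz : i = 0
      · subst hz; rw [if_pos (le_refl 0), gVal_zero_left]
      · rw [if_neg (by omega)]
  | succ I ih =>
    intro hI
    have hr : List.range (I+1) = List.range I ++ [I] := List.range_succ
    rw [hr, List.foldl_append]
    simp only [List.foldl_cons, List.foldl_nil]
    exact cellA_to_rowInv box position _ I
      (innerA_inv box position _ I (by omega) (rowInvA_to_cell box position _ I (ih (by omega))))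

theorem putBox_eq_gVal (box position : List Int) :
    putBox box position = gVal box position box.length position.length := by
  have h := outerA_inv box position
  obtain ⟨_, hv⟩ := h
  rw [putBox]
  simpa using hv box.length position.length le_rfl le_rfl

-- ===== B-side lemmas =====

-- membership in diagonal s of the diagonal list
def pvMem (d : List (PySem.Set Nat)) (s i : Nat) : Prop := i ∈ d.getD s []

-- every recorded cell lies inside the table: i ≤ s, i ≤ n and s - i ≤ m
def GoodD (box position : List Int) (d : List (PySem.Set Nat)) : Prop :=
  ∀ s i, pvMem d s i → i ≤ s ∧ i ≤ box.length ∧ s - i ≤ position.length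

-- every interior cell of diagonal s has its needed children recorded
def ClosedD (box position : List Int) (d : List (PySem.Set Nat)) (s : Nat) : Prop :=
  ∀ i, pvMem d s i → 0 < i → 0 < s - i →
    (box.getD (i - 1) 0 ≤ position.getD (s - i - 1) 0 → pvMem d (s-2) (i - 1)) ∧
    (¬ box.getD (i - 1) 0 ≤ position.getD (s - i - 1) 0 →
      pvMem d (s-1) (i - 1) ∧ pvMem d (s-1) i)

theorem pvGetD_set' {α : Type} (l : List α) (a i : Nat) (v d : α) :
    (l.set a v).getD i d = if a = i ∧ a < l.length then v else l.getD i d := by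
  by_cases h1 : a = i
  · subst h1
    by_cases h2 : a < l.length
    · simp [List.getD_eq_getElem?_getD, h2]
    · rw [List.set_eq_of_length_le (by omega), if_neg (by tauto)]
  · rw [if_neg (by tauto), List.getD_eq_getElem?_getD, List.getElem?_set, if_neg h1,
      List.getD_eq_getElem?_getD]

-- membership after one set/add: old members survive, and we know exactly what was added
theorem mem_set_add_mono (d : List (PySem.Set Nat)) (k t : Nat) (y c : Nat)
    (h : pvMem d t c) : pvMem (d.set k (PySem.Set.add (d.getD k []) y)) t c := by
  rw [pvMem, pvGetD_set']
  split
  · next hk =>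
    obtain ⟨hk1, _⟩ := hk
    subst hk1
    exact (PySem.Set.mem_add _ _ _).mpr (Or.inl h)
  · exact h

theorem mem_set_add_self (d : List (PySem.Set Nat)) (k : Nat) (y : Nat)
    (hk : k < d.length) : pvMem (d.set k (PySem.Set.add (d.getD k []) y)) k y := by
  rw [pvMem, pvGetD_set', if_pos ⟨rfl, hk⟩]
  exact (PySem.Set.mem_add _ _ _).mpr (Or.inr rfl)

theorem mem_set_add_elim (d : List (PySem.Set Nat)) (k t : Nat) (y c : Nat)
    (h : pvMem (d.set k (PySem.Set.add (d.getD k []) y)) t c) :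
    pvMem d t c ∨ (t = k ∧ c = y) := by
  rw [pvMem, pvGetD_set'] at h
  split at h
  · next hk =>
    obtain ⟨hk1, _⟩ := hk
    rcases (PySem.Set.mem_add _ _ _).mp h with h' | h'
    · exact Or.inl (hk1 ▸ h')
    · exact Or.inr ⟨hk1.symm, h'⟩
  · exact Or.inl h

theorem length_childB (box position : List Int) (s : Nat) (d : List (PySem.Set Nat))
    (c : Nat) : (pvChildB box position s d c).length = d.length := by
  rw [pvChildB]
  split
  · rfl
  · split <;> simp

theorem mem_childB_mono (box position : List Int) (s t : Nat) (d : List (PySem.Set Nat))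
    (c' c : Nat) (h : pvMem d t c) : pvMem (pvChildB box position s d c') t c := by
  rw [pvChildB]
  split
  · exact h
  · split
    · exact mem_set_add_mono _ _ _ _ _ h
    · exact mem_set_add_mono _ _ _ _ _ (mem_set_add_mono _ _ _ _ _ h)

theorem mem_childB_elim (box position : List Int) (s t : Nat) (d : List (PySem.Set Nat))
    (c' c : Nat) (h : pvMem (pvChildB box position s d c') t c) :
    pvMem d t c ∨ t = s - 1 ∨ t = s - 2 := by
  rw [pvChildB] at h
  split at h
  · exact Or.inl h
  · split at h
    · rcases mem_set_add_elim _ _ _ _ _ h with h' | h'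
      · exact Or.inl h'
      · exact Or.inr (Or.inr h'.1)
    · rcases mem_set_add_elim _ _ _ _ _ h with h' | h'
      · rcases mem_set_add_elim _ _ _ _ _ h' with h'' | h''
        · exact Or.inl h''
        · exact Or.inr (Or.inl h''.1)
      · exact Or.inr (Or.inl h'.1)

theorem foldl_childB_mono (box position : List Int) (s t : Nat) (l : List Nat)
    (d : List (PySem.Set Nat)) (c : Nat) (h : pvMem d t c) :
    pvMem (l.foldl (fun d i => pvChildB box position s d i) d) t c := by
  induction l generalizing d with
  | nil => exact h
  | cons c' l ih => exact ih _ (mem_childB_mono box position s t d c' c h)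

theorem foldl_childB_elim (box position : List Int) (s t : Nat) (l : List Nat)
    (d : List (PySem.Set Nat)) (c : Nat)
    (h : pvMem (l.foldl (fun d i => pvChildB box position s d i) d) t c) :
    pvMem d t c ∨ t = s - 1 ∨ t = s - 2 := by
  induction l generalizing d with
  | nil => exact Or.inl h
  | cons c' l ih =>
    rcases ih _ h with h' | h' | h'
    · exact mem_childB_elim box position s t d c' c h'
    · exact Or.inr (Or.inl h')
    · exact Or.inr (Or.inr h')

theorem foldl_childB_length (box position : List Int) (s : Nat) (l : List Nat)
    (d : List (PySem.Set Nat)) :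
    (l.foldl (fun d i => pvChildB box position s d i) d).length = d.length := by
  induction l generalizing d with
  | nil => rfl
  | cons c' l ih => rw [List.foldl_cons, ih, length_childB]

theorem childB_good (box position : List Int) (s : Nat) (d : List (PySem.Set Nat))
    (c' : Nat) (hG : GoodD box position d)
    (hc' : c' ≤ s ∧ c' ≤ box.length ∧ s - c' ≤ position.length) :
    GoodD box position (pvChildB box position s d c') := by
  intro t c hc
  rw [pvChildB] at hc
  split at hc
  · exact hG t c hc
  · next hz =>
    split at hc
    · rcases mem_set_add_elim _ _ _ _ _ hc with h2 | h2
      · exact hG _ c h2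
      · obtain ⟨ht, hcy⟩ := h2
        subst ht; subst hcy
        refine ⟨by omega, by omega, by omega⟩
    · rcases mem_set_add_elim _ _ _ _ _ hc with h2 | h2
      · rcases mem_set_add_elim _ _ _ _ _ h2 with h3 | h3
        · exact hG _ c h3
        · obtain ⟨ht, hcy⟩ := h3
          subst ht; subst hcy
          refine ⟨by omega, by omega, by omega⟩
      · obtain ⟨ht, hcy⟩ := h2
        subst ht; subst hcy
        refine ⟨by omega, by omega, by omega⟩

theorem foldl_childB_good (box position : List Int) (s : Nat) (l : List Nat)
    (d : List (PySem.Set Nat)) (hG : GoodD box position d)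
    (hl : ∀ c' ∈ l, c' ≤ s ∧ c' ≤ box.length ∧ s - c' ≤ position.length) :
    GoodD box position (l.foldl (fun d i => pvChildB box position s d i) d) := by
  induction l generalizing d with
  | nil => exact hG
  | cons c' l ih =>
    exact ih _ (childB_good box position s d c' hG (hl c' (by simp)))
      (fun c hc => hl c (by simp [hc]))

theorem step1_good (box position : List Int) (s : Nat) (d : List (PySem.Set Nat))
    (hG : GoodD box position d) : GoodD box position (pvStep1 box position s d) := by
  rw [pvStep1]
  exact foldl_childB_good box position s _ d hG (fun c hc => hG s c hc)

-- interior cells of the iterated snapshot get their children recorded, and they persist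
theorem foldl_childB_closes (box position : List Int) (s : Nat) (l : List Nat)
    (d : List (PySem.Set Nat)) (hs : 2 ≤ s) (hlen : s - 1 < d.length) :
    ∀ c ∈ l, 0 < c → 0 < s - c →
      (box.getD (c - 1) 0 ≤ position.getD (s - c - 1) 0 →
        pvMem (l.foldl (fun d i => pvChildB box position s d i) d) (s-2) (c - 1)) ∧
      (¬ box.getD (c - 1) 0 ≤ position.getD (s - c - 1) 0 →
        pvMem (l.foldl (fun d i => pvChildB box position s d i) d) (s-1) (c - 1) ∧
        pvMem (l.foldl (fun d i => pvChildB box position s d i) d) (s-1) c) := by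
  induction l generalizing d with
  | nil => intro c hc; exact absurd hc (List.not_mem_nil)
  | cons c' l ih =>
    intro c hc h1 h2
    rw [List.foldl_cons]
    rcases List.mem_cons.mp hc with hc | hc
    · subst hc
      have hd' : ∀ t y, pvMem (pvChildB box position s d c) t y →
          pvMem (l.foldl (fun d i => pvChildB box position s d i) (pvChildB box position s d c)) t y :=
        fun t y hy => foldl_childB_mono box position s t l _ y hy
      constructor
      · intro hcmp
        refine hd' _ _ ?_
        rw [pvChildB, if_neg (by omega), if_pos hcmp]
        exact mem_set_add_self _ _ _ (by omega)
      · intro hcmp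
        have hA : pvMem (pvChildB box position s d c) (s-1) c := by
          rw [pvChildB, if_neg (by omega), if_neg hcmp]
          exact mem_set_add_self _ _ _ (by simpa using hlen)
        have hB : pvMem (pvChildB box position s d c) (s-1) (c - 1) := by
          rw [pvChildB, if_neg (by omega), if_neg hcmp]
          exact mem_set_add_mono _ _ _ _ _ (mem_set_add_self _ _ _ (by omega))
        exact ⟨hd' _ _ hB, hd' _ _ hA⟩
    · exact ih (pvChildB box position s d c') (by rw [length_childB]; exact hlen) c hc h1 h2

theorem step1_snapshot (box position : List Int) (s : Nat) (d : List (PySem.Set Nat))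
    (hs : 2 ≤ s) (c : Nat) (h : pvMem (pvStep1 box position s d) s c) : pvMem d s c := by
  rcases foldl_childB_elim box position s s _ d c h with h' | h' | h' <;> first | exact h' | omega

theorem step1_closes (box position : List Int) (s : Nat) (d : List (PySem.Set Nat))
    (hs : 2 ≤ s) (hlen : s - 1 < d.length) :
    ClosedD box position (pvStep1 box position s d) s := by
  intro c hc h1 h2
  have hc' : pvMem d s c := step1_snapshot box position s d hs c hc
  exact foldl_childB_closes box position s _ d hs hlen c hc' h1 h2

theorem step1_pres_closed (box position : List Int) (s t : Nat) (d : List (PySem.Set Nat))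
    (hs : 2 ≤ s) (ht : s < t) (h : ClosedD box position d t) :
    ClosedD box position (pvStep1 box position s d) t := by
  intro c hc h1 h2
  have hc' : pvMem d t c := by
    rcases foldl_childB_elim box position s t _ d c hc with h' | h' | h' <;> first | exact h' | omega
  obtain ⟨hf, hg⟩ := h c hc' h1 h2
  constructor
  · intro hcmp
    exact foldl_childB_mono box position s _ _ d _ (hf hcmp)
  · intro hcmp
    exact ⟨foldl_childB_mono box position s _ _ d _ (hg hcmp).1,
           foldl_childB_mono box position s _ _ d _ (hg hcmp).2⟩

theorem phase1_spec (box position : List Int) :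
    ∀ (k : Nat) (d : List (PySem.Set Nat)),
      d.length = box.length + position.length + 1 → k ≤ box.length + position.length →
      GoodD box position d → (∀ t, k < t → ClosedD box position d t) →
      GoodD box position (pvPhase1 box position k d) ∧
      (∀ t, 1 < t → ClosedD box position (pvPhase1 box position k d) t) := by
  intro k
  induction k using Nat.strong_induction_on with
  | _ k ih =>
    intro d hlen hk hG hC
    match k with
    | 0 => exact ⟨hG, fun t ht => hC t (by omega)⟩
    | 1 => exact ⟨hG, fun t ht => hC t (by omega)⟩
    | (s+2) =>
      rw [pvPhase1]
      refine ih (s+1) (by omega) _ ?_ (by omega) ?_ ?_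
      · rw [pvStep1, foldl_childB_length]; exact hlen
      · exact step1_good box position (s+2) d hG
      · intro t ht
        by_cases hts : t = s + 2
        · subst hts
          exact step1_closes box position (s+2) d (by omega) (by omega)
        · exact step1_pres_closed box position (s+2) t d (by omega) (by omega) (hC t (by omega))

theorem phase1_mono (box position : List Int) (k t : Nat) (d : List (PySem.Set Nat))
    (c : Nat) (h : pvMem d t c) : pvMem (pvPhase1 box position k d) t c := by
  induction k using Nat.strong_induction_on generalizing d with
  | _ k ih =>
    match k with
    | 0 => exact h
    | 1 => exact h
    | (s+2) =>
      rw [pvPhase1]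
      exact ih (s+1) (by omega) _ (foldl_childB_mono box position (s+2) t _ d c h)

-- ===== phase 2 =====

theorem ite_ge_eq_max (p q : Int) : (if q ≤ p then p else q) = max p q := by
  split
  · next h => exact (max_eq_left h).symm
  · next h => exact (max_eq_right (by omega)).symm

theorem foldl_cellB_spec (box position : List Int) (d : List (PySem.Set Nat)) (k : Nat)
    (hG : GoodD box position d) (hC : ∀ t, 1 < t → ClosedD box position d t)
    (p1 p2 : PySem.Dict Nat Int)
    (Hp1 : 1 ≤ k → ∀ i, pvMem d (k-1) i → p1.get? i = some (gVal box position i (k-1-i)))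
    (Hp2 : 2 ≤ k → ∀ i, pvMem d (k-2) i → p2.get? i = some (gVal box position i (k-2-i)))
    (l : List Nat) (cur : PySem.Dict Nat Int)
    (hl : ∀ i ∈ l, pvMem d k i) :
    (∀ i0, cur.get? i0 = some (gVal box position i0 (k-i0)) →
      (l.foldl (pvCellB box position k p1 p2) cur).get? i0 = some (gVal box position i0 (k-i0))) ∧
    (∀ i ∈ l, (l.foldl (pvCellB box position k p1 p2) cur).get? i = some (gVal box position i (k-i))) := by
  induction l generalizing cur with
  | nil => exact ⟨fun i0 h => h, fun i hi => absurd hi (List.not_mem_nil)⟩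
  | cons i l ihl =>
    have hik : pvMem d k i := hl i (by simp)
    have hbnd : i ≤ k ∧ i ≤ box.length ∧ k - i ≤ position.length := hG k i hik
    -- the head cell is inserted with the correct value
    have hstep : (pvCellB box position k p1 p2 cur i).get? i =
        some (gVal box position i (k-i)) := by
      rw [pvCellB]
      by_cases hz : i = 0 ∨ k - i = 0
      · rw [if_pos hz, PySem.Dict.get?_insert_self]
        rcases hz with hz | hz
        · subst hz
          rw [gVal_zero_left]
        · rw [hz, gVal_zero_right]
      · rw [if_neg hz]
        have h1 : 0 < i := by omega
        have h2 : 0 < k - i := by omega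
        have hk2 : 2 ≤ k := by omega
        obtain ⟨hf, hg⟩ := hC k (by omega) i hik h1 h2
        obtain ⟨a, rfl⟩ : ∃ a, i = a + 1 := ⟨i - 1, by omega⟩
        obtain ⟨b, hb⟩ : ∃ b, k - (a + 1) = b + 1 := ⟨k - (a + 1) - 1, by omega⟩
        have e0 : a + 1 - 1 = a := by omega
        have e1 : k - (a + 1) - 1 = b := by omega
        have e2 : k - 2 - a = b := by omega
        have e3 : k - 1 - a = b + 1 := by omega
        have e4 : k - 1 - (a + 1) = b := by omega
        rw [e0, e1, hb, gVal_succ]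
        by_cases hcmp : box.getD a 0 ≤ position.getD b 0
        · rw [if_pos hcmp, PySem.Dict.get?_insert_self, if_pos hcmp,
            Hp2 (by omega) a (by rw [← e0]; exact hf (by rwa [e0, e1])), e2]
          simp only [Option.getD_some]
        · rw [if_neg hcmp, PySem.Dict.get?_insert_self, if_neg hcmp]
          have hgm := hg (by rwa [e0, e1])
          rw [Hp1 (by omega) a (by rw [← e0]; exact hgm.1), e3,
            Hp1 (by omega) (a+1) hgm.2, e4]
          simp only [Option.getD_some]
          rw [ite_ge_eq_max]
    -- the step preserves every already-correct binding
    have hkeep : ∀ i0, cur.get? i0 = some (gVal box position i0 (k-i0)) →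
        (pvCellB box position k p1 p2 cur i).get? i0 = some (gVal box position i0 (k-i0)) := by
      intro i0 h0
      by_cases hii : i0 = i
      · subst hii
        exact hstep
      · rw [pvCellB]
        split
        · rw [PySem.Dict.get?_insert_of_ne _ _ (by simpa using hii)]
          exact h0
        · split <;>
          · rw [PySem.Dict.get?_insert_of_ne _ _ (by simpa using hii)]
            exact h0
    obtain ⟨ih1, ih2⟩ := ihl (pvCellB box position k p1 p2 cur i)
      (fun i' hi' => hl i' (by simp [hi']))
    refine ⟨fun i0 h0 => ih1 i0 (hkeep i0 h0), fun i' hi' => ?_⟩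
    rcases List.mem_cons.mp hi' with h' | h'
    · subst h'
      exact ih1 i' hstep
    · exact ih2 i' h'

theorem phase2_spec (box position : List Int) (d : List (PySem.Set Nat))
    (hG : GoodD box position d) (hC : ∀ t, 1 < t → ClosedD box position d t) :
    ∀ k, (∀ i, pvMem d k i →
        (pvPhase2 box position d k).1.get? i = some (gVal box position i (k-i))) ∧
      (1 ≤ k → ∀ i, pvMem d (k-1) i →
        (pvPhase2 box position d k).2.get? i = some (gVal box position i (k-1-i))) := by
  intro k
  induction k with
  | zero =>
    refine ⟨fun i hi => ?_, fun h => absurd h (by omega)⟩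
    exact (foldl_cellB_spec box position d 0 hG hC PySem.Dict.empty PySem.Dict.empty
      (fun h => absurd h (by omega)) (fun h => absurd h (by omega)) _ PySem.Dict.empty
      (fun i' hi' => hi')).2 i hi
  | succ k ihk =>
    obtain ⟨ih1, ih2⟩ := ihk
    have H := foldl_cellB_spec box position d (k+1) hG hC
      (pvPhase2 box position d k).1 (pvPhase2 box position d k).2
      (fun _ i hi => by simpa using ih1 i (by simpa using hi))
      (fun hk i hi => by
        have := ih2 (by omega) i (by simpa using hi)
        simpa using this)
      (d.getD (k+1) []) PySem.Dict.empty (fun i' hi' => hi')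
    refine ⟨fun i hi => H.2 i hi, fun _ i hi => ?_⟩
    simpa using ih1 i (by simpa using hi)

theorem d0_spec (box position : List Int) (d0 : List (PySem.Set Nat))
    (hd0 : d0 = (((List.range (box.length+position.length+1)).map
        (fun _ => ([] : PySem.Set Nat))).set (box.length+position.length)
        (PySem.Set.add [] box.length))) :
    d0.length = box.length + position.length + 1 ∧
    GoodD box position d0 ∧
    (∀ t, box.length + position.length < t → ClosedD box position d0 t) ∧
    pvMem d0 (box.length + position.length) box.length := by
  have hlen : d0.length = box.length + position.length + 1 := by simp [hd0]
  have hmem : ∀ t c, pvMem d0 t c → t = box.length + position.length ∧ c = box.length := by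
    intro t c hc
    rw [pvMem, hd0, pvGetD_set'] at hc
    split at hc
    · next hk =>
      rcases (PySem.Set.mem_add _ _ _).mp hc with h' | h'
      · exact absurd h' (List.not_mem_nil)
      · exact ⟨hk.1.symm, h'⟩
    · exfalso
      by_cases ht : t < box.length + position.length + 1
      · rw [getD_map_const_range _ _ _ _ (by simpa using ht)] at hc
        exact absurd hc (List.not_mem_nil)
      · rw [List.getD_eq_getElem?_getD,
          List.getElem?_eq_none (by simpa using (by omega : box.length + position.length + 1 ≤ t))] at hc
        exact absurd hc (List.not_mem_nil)
  refine ⟨hlen, ?_, ?_, ?_⟩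
  · intro s c hc
    obtain ⟨hs2, hc2⟩ := hmem s c hc
    subst hs2; subst hc2
    exact ⟨by omega, le_rfl, by omega⟩
  · intro t ht c hc _ _
    obtain ⟨hs2, _⟩ := hmem t c hc
    omega
  · rw [pvMem, hd0, pvGetD_set', if_pos ⟨rfl, by simp⟩]
    exact (PySem.Set.mem_add _ _ _).mpr (Or.inr rfl)

theorem putBox_alt_eq_gVal (box position : List Int) :
    putBox_alt box position = gVal box position box.length position.length := by
  obtain ⟨hlen, hG0, hC0, hm0⟩ := d0_spec box position _ rfl
  have hD := phase1_spec box position (box.length + position.length) _ hlen le_rfl hG0 hC0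
  have hmD : pvMem (pvPhase1 box position (box.length + position.length)
      ((((List.range (box.length+position.length+1)).map
        (fun _ => ([] : PySem.Set Nat))).set (box.length+position.length)
        (PySem.Set.add [] box.length))))
      (box.length + position.length) box.length :=
    phase1_mono box position _ _ _ _ hm0
  have hval := (phase2_spec box position _ hD.1 hD.2 (box.length + position.length)).1
    box.length hmD
  have em : box.length + position.length - box.length = position.length := by omega
  rw [em] at hval
  show (((pvPhase2 box position (pvPhase1 box position (box.length + position.length)
      ((((List.range (box.length+position.length+1)).map
        (fun _ => ([] : PySem.Set Nat))).set (box.length+position.length)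
        (PySem.Set.add [] box.length))))
      (box.length + position.length)).1).get? box.length).getD 0 =
    gVal box position box.length position.length
  rw [hval]
  rfl

-- ===== VERDICT (by name: the statement is the Claim_ definition above) =====
theorem putBox_spec : Claim_equal_putBox := by
  intro box position _
  unfold Spec_putBox
  rw [putBox_eq_gVal, putBox_alt_eq_gVal]
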